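-- pv_equiv track=rewrite | github.com/hoanghapham/vlm-htr-app | src/data_processing/visual_tasks.py | sort_polygons
-- ===== SOURCE A (Python) =====
-- def sort_polygons(polygons, y_threshold=10):
--     """
--     Sort polygons top-to-bottom, left-to-right within horizontal bands.
--
--     Args:
--         polygons: list of list of (x, y) tuples
--         y_threshold: vertical tolerance to consider two masks on the same line
--
--     Returns:
--         Sorted list of polygons
--     """
--     # Extract min y and min x for each polygon
--
--     def polygon_key(poly):
--         ys = [pt[1] for pt in poly]
--         xs = [pt[0] for pt in poly]
--         return (min(ys), min(xs))
--
--     # Sort polygons initially by min y and then min x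
--     try:
--         polygons_sorted = sorted(polygons, key=polygon_key)
--     except Exception:
--         return []
--
--     # Now group by horizontal line (based on y threshold)
--     grouped = []
--     current_group = [polygons_sorted[0]]
--     current_y = min(pt[1] for pt in polygons_sorted[0])
--
--     for poly in polygons_sorted[1:]:
--         min_y = min(pt[1] for pt in poly)
--         if abs(min_y - current_y) <= y_threshold:
--             current_group.append(poly)
--         else:
--             grouped.append(sorted(current_group, key=lambda p: min(pt[0] for pt in p)))
--             current_group = [poly]
--             current_y = min_y
--
--     grouped.append(sorted(current_group, key=lambda p: min(pt[0] for pt in p)))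
--
--     # Flatten the grouped list
--     return [poly for group in grouped for poly in group]
-- ===== SOURCE B (Python) =====
-- def sort_polygons(polygons, y_threshold=10):
--     # Selection-based band extraction: no global pre-sort. Repeatedly pick the
--     # topmost-leftmost remaining polygon as the band seed, peel off every
--     # remaining polygon within y_threshold of the seed's top, and emit that
--     # band sorted by (min_x, min_y); repeat on what is left.
--     try:
--         items = [(min(pt[1] for pt in p), min(pt[0] for pt in p), i, p)
--                  for i, p in enumerate(polygons)]
--     except ValueError:
--         return []  # a polygon with no points
--     result = []
--     remaining = items
--     while remaining:
--         seed = min(remaining, key=lambda t: (t[0], t[1], t[2]))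
--         y0, i0 = seed[0], seed[2]
--         band = [t for t in remaining if t[0] - y0 <= y_threshold or t[2] == i0]
--         remaining = [t for t in remaining
--                      if not (t[0] - y0 <= y_threshold or t[2] == i0)]
--         result += [t[3] for t in sorted(band, key=lambda t: (t[1], t[0]))]
--     return result
-- ===== Notes on version B (the rewrite author's own statement) =====
-- stated objective: alternative
-- what changed: Instead of globally pre-sorting the polygons and sweeping once to cut bands, B never sorts the whole list: it repeatedly selects the topmost-leftmost remaining polygon as a band seed, peels off all remaining polygons within the y-tolerance of that seed by filtering, sorts just that band by (min_x, min_y), and recurses on the leftovers.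
import Mathlib
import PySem

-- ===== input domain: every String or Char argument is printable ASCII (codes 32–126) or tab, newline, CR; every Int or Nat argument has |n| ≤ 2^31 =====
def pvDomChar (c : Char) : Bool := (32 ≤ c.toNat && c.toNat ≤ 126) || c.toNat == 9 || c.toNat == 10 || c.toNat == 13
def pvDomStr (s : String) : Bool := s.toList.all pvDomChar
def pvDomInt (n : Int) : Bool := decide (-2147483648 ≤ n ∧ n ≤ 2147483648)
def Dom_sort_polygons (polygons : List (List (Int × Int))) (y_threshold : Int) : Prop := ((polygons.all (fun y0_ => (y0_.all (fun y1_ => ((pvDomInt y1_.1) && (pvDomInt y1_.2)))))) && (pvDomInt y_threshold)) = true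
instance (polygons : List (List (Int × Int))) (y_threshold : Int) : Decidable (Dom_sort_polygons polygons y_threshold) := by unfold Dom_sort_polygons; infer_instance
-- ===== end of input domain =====

-- B swaps A's global sort + sweep for selection-based band extraction (a repeated
-- minimum + filter peeling off one band at a time): an alternative decomposition, same results.

-- ===== PORT A =====
-- min(pt[1] for pt in poly) / min(pt[0] for pt in poly); the .getD 0 is never reached: both ports
-- guard the empty-polygon case (Python's ValueError → return []) before using these.
def pvMinY (poly : List (Int × Int)) : Int :=
  (PySem.List.min? (poly.map (fun pt => pt.2)) (fun y => y)).getD 0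
def pvMinX (poly : List (Int × Int)) : Int :=
  (PySem.List.min? (poly.map (fun pt => pt.1)) (fun x => x)).getD 0

-- loop body of A: state = (grouped, current_group, current_y)
def pvStepA (y_threshold : Int)
    (s : List (List (List (Int × Int))) × List (List (Int × Int)) × Int)
    (poly : List (Int × Int)) :
    List (List (List (Int × Int))) × List (List (Int × Int)) × Int :=
  let min_y := pvMinY poly
  if |min_y - s.2.2| ≤ y_threshold then
    (s.1, s.2.1 ++ [poly], s.2.2)
  else
    (s.1 ++ [PySem.List.sorted s.2.1 pvMinX], [poly], min_y)

def sort_polygons (polygons : List (List (Int × Int))) (y_threshold : Int) : List (List (Int × Int)) :=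
  if polygons.any (fun p => p.isEmpty) then
    []  -- min() raises ValueError inside the try → except returns []
  else
    match PySem.List.sorted2 polygons pvMinY pvMinX with
    | [] => []  -- Python raises IndexError at polygons_sorted[0]; excluded by Pre_
    | first :: rest =>
      let st := rest.foldl (pvStepA y_threshold) ([], [first], pvMinY first)
      (st.1 ++ [PySem.List.sorted st.2.1 pvMinX]).flatten

-- ===== PORT B =====
-- key(t) = (t[0], t[1], t[2]) used by min(); Python's tuple < is lexicographic
def pvKeyY3 (t : Int × Int × Int × List (Int × Int)) : Lex (Int × Lex (Int × Int)) :=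
  toLex (t.1, toLex (t.2.1, t.2.2.1))

-- min(remaining, key=lambda t: (t[0], t[1], t[2])) over the nonempty remaining list:
-- Python's min scans left to right and keeps the current element on ties — exactly this fold
def pvMinFold (r0 : Int × Int × Int × List (Int × Int))
    (rt : List (Int × Int × Int × List (Int × Int))) : Int × Int × Int × List (Int × Int) :=
  rt.foldl (fun best x => if pvKeyY3 x < pvKeyY3 best then x else best) r0

-- t[0] - y0 <= y_threshold or t[2] == i0
def pvCond (y_threshold : Int)
    (seed t : Int × Int × Int × List (Int × Int)) : Bool :=
  decide (t.1 - seed.1 ≤ y_threshold) || decide (t.2.2.1 = seed.2.2.1)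

-- the items comprehension: (min_y, min_x, i, p) for i, p in enumerate(polygons)
def pvQuads (polygons : List (List (Int × Int))) :
    List (Int × Int × Int × List (Int × Int)) :=
  (PySem.List.enumerate polygons).map (fun ip => (pvMinY ip.2, pvMinX ip.2, ip.1, ip.2))

-- cited by pvBLoop's decreasing_by (the extracted seed leaves the remainder strictly smaller)
theorem pvMinFold_mem :
    ∀ (rt : List (Int × Int × Int × List (Int × Int)))
      (r0 : Int × Int × Int × List (Int × Int)), pvMinFold r0 rt ∈ r0 :: rt := by
  intro rt
  induction rt with
  | nil => intro r0; simp [pvMinFold]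
  | cons x t ih =>
    intro r0
    simp only [pvMinFold, List.foldl_cons]
    have := ih (if pvKeyY3 x < pvKeyY3 r0 then x else r0)
    rw [pvMinFold] at this
    rcases List.mem_cons.1 this with h' | h'
    · rw [h']
      split <;> simp
    · simp [h']

-- the while loop: extract the seed's band, emit it sorted by (t[1], t[0]), recurse on the rest
def pvBLoop (y_threshold : Int)
    (remaining : List (Int × Int × Int × List (Int × Int))) : List (List (Int × Int)) :=
  match remaining with
  | [] => []  -- while loop ends
  | r0 :: rt =>
    (PySem.List.sorted2 ((r0 :: rt).filter (pvCond y_threshold (pvMinFold r0 rt)))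
        (fun t => t.2.1) (fun t => t.1)).map (fun t => t.2.2.2)
      ++ pvBLoop y_threshold ((r0 :: rt).filter (fun t => !(pvCond y_threshold (pvMinFold r0 rt) t)))
termination_by remaining.length
decreasing_by
  refine List.length_filter_lt_length_iff_exists.2 ⟨pvMinFold r0 rt, pvMinFold_mem rt r0, ?_⟩
  simp [pvCond]

def sort_polygons_alt (polygons : List (List (Int × Int))) (y_threshold : Int) :
    List (List (Int × Int)) :=
  if polygons.any (fun p => p.isEmpty) then
    []  -- ValueError in the items comprehension → return []
  else
    pvBLoop y_threshold (pvQuads polygons)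

-- ===== PRECONDITION & SPEC =====
-- Pre_ excludes only polygons = [], on which Python A raises IndexError (polygons_sorted[0]).
def Pre_sort_polygons (polygons : List (List (Int × Int))) (y_threshold : Int) : Prop :=
  polygons ≠ []
instance (polygons : List (List (Int × Int))) (y_threshold : Int) : Decidable (Pre_sort_polygons polygons y_threshold) := by unfold Pre_sort_polygons; infer_instance

def pvWitness_sort_polygons : (List (List (Int × Int))) × Int := ([[(0, 0), (3, 1)], [(5, 20)]], 10)

def Spec_sort_polygons (polygons : List (List (Int × Int))) (y_threshold : Int) (out : List (List (Int × Int))) : Prop := out = sort_polygons_alt polygons y_threshold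
instance (polygons : List (List (Int × Int))) (y_threshold : Int) (out : List (List (Int × Int))) : Decidable (Spec_sort_polygons polygons y_threshold out) := by unfold Spec_sort_polygons; infer_instance

-- ===== CLAIM (what is proved, stated in full; the proofs are below) =====
def Claim_equal_sort_polygons : Prop := ∀ (polygons : List (List (Int × Int))) (y_threshold : Int), Dom_sort_polygons polygons y_threshold → Pre_sort_polygons polygons y_threshold → Spec_sort_polygons polygons y_threshold (sort_polygons polygons y_threshold)

-- ===== LEMMAS AND PROOFS =====

-- abbreviations used only by the proofs
abbrev pvP : Type := List (Int × Int)
abbrev pvQ : Type := Int × Int × Int × pvP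

def pvProj (t : pvQ) : pvP := t.2.2.2
-- the key of B's band sort: (t[1], t[0], index) lexicographically
def pvKeyX3 (t : pvQ) : Lex (Int × Lex (Int × Int)) := toLex (t.2.1, toLex (t.1, t.2.2.1))
-- "key-faithful" quads: the first two components are the keys of the carried polygon
def pvPq (t : pvQ) : Prop := t.1 = pvMinY t.2.2.2 ∧ t.2.1 = pvMinX t.2.2.2

-- comparators, exactly as the ports' sorts use them (see the rfl bridges below)
def pvCmpPolyY (p q : pvP) : Bool :=
  decide (pvMinY p < pvMinY q) || (!decide (pvMinY q < pvMinY p) && decide (pvMinX p < pvMinX q))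
def pvCmpPolyX (p q : pvP) : Bool := decide (pvMinX p < pvMinX q)
def pvCmpPair (a b : pvQ) : Bool :=
  decide (a.2.1 < b.2.1) || (!decide (b.2.1 < a.2.1) && decide (a.1 < b.1))
def pvCmpY3 (a b : pvQ) : Bool := decide (pvKeyY3 a < pvKeyY3 b)
def pvCmpX3 (a b : pvQ) : Bool := decide (pvKeyX3 a < pvKeyX3 b)

def pvSortB {α : Type} (before : α → α → Bool) (l : List α) : List α :=
  l.foldl (fun acc x => PySem.List.insertBy before x acc) []

theorem pv_sorted2_poly (l : List pvP) :
    PySem.List.sorted2 l pvMinY pvMinX = pvSortB pvCmpPolyY l := rfl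
theorem pv_sorted2_pair (l : List pvQ) :
    PySem.List.sorted2 l (fun t => t.2.1) (fun t => t.1) = pvSortB pvCmpPair l := rfl
theorem pv_sorted_x (l : List pvP) :
    PySem.List.sorted l pvMinX = pvSortB pvCmpPolyX l := rfl
theorem pv_sorted_y3 (l : List pvQ) :
    PySem.List.sorted l pvKeyY3 false = pvSortB pvCmpY3 l :=
  PySem.List.sorted_eq_foldl_insertBy l pvKeyY3
theorem pv_sorted_x3 (l : List pvQ) :
    PySem.List.sorted l pvKeyX3 false = pvSortB pvCmpX3 l :=
  PySem.List.sorted_eq_foldl_insertBy l pvKeyX3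

-- membership in the band started at height y0
def pvCondQ (y_threshold y0 : Int) (t : pvQ) : Bool := decide (t.1 - y0 ≤ y_threshold)

-- A's grouping, structurally: split the (already sorted) list into maximal bands,
-- each band sorted by min x (poly level) / by pvKeyX3 (quad level)
def pvGroupsP (y_threshold : Int) (l : List pvP) : List (List pvP) :=
  match l with
  | [] => []
  | e :: s' =>
    pvSortB pvCmpPolyX (e :: s'.takeWhile (fun p => decide (pvMinY p - pvMinY e ≤ y_threshold)))
      :: pvGroupsP y_threshold (s'.dropWhile (fun p => decide (pvMinY p - pvMinY e ≤ y_threshold)))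
termination_by l.length
decreasing_by
  simpa using Nat.lt_succ_of_le (List.Sublist.length_le (List.dropWhile_sublist _))

def pvGroupsQ (y_threshold : Int) (l : List pvQ) : List (List pvQ) :=
  match l with
  | [] => []
  | e :: s' =>
    pvSortB pvCmpX3 (e :: s'.takeWhile (pvCondQ y_threshold e.1))
      :: pvGroupsQ y_threshold (s'.dropWhile (pvCondQ y_threshold e.1))
termination_by l.length
decreasing_by
  simpa using Nat.lt_succ_of_le (List.Sublist.length_le (List.dropWhile_sublist _))

-- unfolding helpers for the well-founded definitions
theorem pvGroupsP_nil (thr : Int) : pvGroupsP thr [] = [] := by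
  rw [pvGroupsP.eq_def]

theorem pvGroupsP_cons (thr : Int) (e : pvP) (s' : List pvP) :
    pvGroupsP thr (e :: s')
      = pvSortB pvCmpPolyX (e :: s'.takeWhile (fun p => decide (pvMinY p - pvMinY e ≤ thr)))
          :: pvGroupsP thr (s'.dropWhile (fun p => decide (pvMinY p - pvMinY e ≤ thr))) := by
  conv_lhs => rw [pvGroupsP.eq_def]

theorem pvGroupsQ_nil (thr : Int) : pvGroupsQ thr [] = [] := by
  rw [pvGroupsQ.eq_def]

theorem pvGroupsQ_cons (thr : Int) (e : pvQ) (s' : List pvQ) :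
    pvGroupsQ thr (e :: s')
      = pvSortB pvCmpX3 (e :: s'.takeWhile (pvCondQ thr e.1))
          :: pvGroupsQ thr (s'.dropWhile (pvCondQ thr e.1)) := by
  conv_lhs => rw [pvGroupsQ.eq_def]

theorem pvBLoop_nil (thr : Int) : pvBLoop thr [] = [] := by
  rw [pvBLoop.eq_def]

theorem pvBLoop_cons (thr : Int) (r0 : pvQ) (rt : List pvQ) :
    pvBLoop thr (r0 :: rt)
      = (PySem.List.sorted2 ((r0 :: rt).filter (pvCond thr (pvMinFold r0 rt)))
            (fun t => t.2.1) (fun t => t.1)).map (fun t => t.2.2.2)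
          ++ pvBLoop thr ((r0 :: rt).filter (fun t => !(pvCond thr (pvMinFold r0 rt) t))) := by
  conv_lhs => rw [pvBLoop.eq_def]

-- ----- generic stable-insertion machinery -----

theorem pv_insertBy_map {α β : Type} (b1 : β → β → Bool) (b2 : α → α → Bool)
    (f : α → β) (x : α) :
    ∀ acc : List α, (∀ y ∈ acc, b1 (f x) (f y) = b2 x y) →
      PySem.List.insertBy b1 (f x) (acc.map f) = (PySem.List.insertBy b2 x acc).map f := by
  intro acc
  induction acc with
  | nil => intro _; rfl
  | cons y acc ih =>
    intro h
    have hy : b1 (f x) (f y) = b2 x y := h y (by simp)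
    simp only [List.map_cons, PySem.List.insertBy, hy]
    by_cases hb : b2 x y = true
    · simp [hb]
    · simp only [Bool.not_eq_true] at hb
      simp [hb, ih (fun z hz => h z (by simp [hz]))]

theorem pv_sortB_map_aux {α β : Type} (b1 : β → β → Bool) (b2 : α → α → Bool)
    (f : α → β) (R : α → α → Prop)
    (hc : ∀ x y, R y x → b1 (f x) (f y) = b2 x y) :
    ∀ (l acc : List α), l.Pairwise R → (∀ x ∈ l, ∀ y ∈ acc, R y x) →
      (l.map f).foldl (fun a z => PySem.List.insertBy b1 z a) (acc.map f)
        = (l.foldl (fun a z => PySem.List.insertBy b2 z a) acc).map f := by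
  intro l
  induction l with
  | nil => intro acc _ _; rfl
  | cons x l ih =>
    intro acc hp hacc
    simp only [List.map_cons, List.foldl_cons]
    rw [pv_insertBy_map b1 b2 f x acc (fun y hy => hc x y (hacc x (by simp) y hy))]
    refine ih (PySem.List.insertBy b2 x acc) (List.Pairwise.of_cons hp) ?_
    intro z hz y hy
    rcases (PySem.List.mem_insertBy _ _ _ _).1 hy with h' | h'
    · subst h'
      exact (List.pairwise_cons.1 hp).1 z hz
    · exact hacc z (by simp [hz]) y h'

theorem pv_sortB_map_rel {α β : Type} (b1 : β → β → Bool) (b2 : α → α → Bool)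
    (f : α → β) (R : α → α → Prop) (l : List α) (hp : l.Pairwise R)
    (hc : ∀ x y, R y x → b1 (f x) (f y) = b2 x y) :
    pvSortB b1 (l.map f) = (pvSortB b2 l).map f := by
  have := pv_sortB_map_aux b1 b2 f R hc l [] hp (by simp)
  simpa [pvSortB] using this

theorem pv_sortB_congr_rel {α : Type} (b1 b2 : α → α → Bool) (R : α → α → Prop)
    (l : List α) (hp : l.Pairwise R) (hc : ∀ x y, R y x → b1 x y = b2 x y) :
    pvSortB b1 l = pvSortB b2 l := by
  have := pv_sortB_map_rel b1 b2 id R l hp hc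
  simpa using this

theorem pv_pairwise_mem {α : Type} {P : α → Prop} {R : α → α → Prop} :
    ∀ {l : List α}, l.Pairwise R → (∀ x ∈ l, P x) →
      l.Pairwise (fun a b => R a b ∧ P a ∧ P b) := by
  intro l
  induction l with
  | nil => intro _ _; exact List.Pairwise.nil
  | cons x l ih =>
    intro hp hP
    rcases List.pairwise_cons.1 hp with ⟨h1, h2⟩
    exact List.Pairwise.cons
      (fun b hb => ⟨h1 b hb, hP x (by simp), hP b (by simp [hb])⟩)
      (ih h2 (fun y hy => hP y (by simp [hy])))

-- ----- comparator agreement lemmas -----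

theorem pv_cmpY_lift (x y : pvQ) (hx : pvPq x) (hy : pvPq y) (hR : y.2.2.1 < x.2.2.1) :
    pvCmpPolyY (pvProj x) (pvProj y) = pvCmpY3 x y := by
  obtain ⟨hx1, hx2⟩ := hx
  obtain ⟨hy1, hy2⟩ := hy
  simp only [pvCmpPolyY, pvCmpY3, pvKeyY3, pvProj, ← hx1, ← hx2, ← hy1, ← hy2]
  rw [Bool.eq_iff_iff]
  simp only [Bool.or_eq_true, Bool.and_eq_true, Bool.not_eq_true', decide_eq_true_eq,
    decide_eq_false_iff_not, Prod.Lex.lt_iff, ofLex_toLex]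
  omega

theorem pv_cmpX_lift (x y : pvQ) (hx : pvPq x) (hy : pvPq y) (hR : pvKeyY3 y < pvKeyY3 x) :
    pvCmpPolyX (pvProj x) (pvProj y) = pvCmpX3 x y := by
  obtain ⟨hx1, hx2⟩ := hx
  obtain ⟨hy1, hy2⟩ := hy
  have hR' : y.1 < x.1 ∨ (y.1 = x.1 ∧ (y.2.1 < x.2.1 ∨ (y.2.1 = x.2.1 ∧ y.2.2.1 < x.2.2.1))) := by
    simpa [pvKeyY3, Prod.Lex.lt_iff, ofLex_toLex] using hR
  simp only [pvCmpPolyX, pvCmpX3, pvKeyX3, pvProj, ← hx1, ← hx2, ← hy1, ← hy2]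
  rw [Bool.eq_iff_iff]
  simp only [decide_eq_true_eq, Prod.Lex.lt_iff, ofLex_toLex]
  omega

theorem pv_cmpPair_lift (x y : pvQ) (hR : y.2.2.1 < x.2.2.1) :
    pvCmpPair x y = pvCmpX3 x y := by
  simp only [pvCmpPair, pvCmpX3, pvKeyX3]
  rw [Bool.eq_iff_iff]
  simp only [Bool.or_eq_true, Bool.and_eq_true, Bool.not_eq_true', decide_eq_true_eq,
    decide_eq_false_iff_not, Prod.Lex.lt_iff, ofLex_toLex]
  omega

-- key injectivity on the index component
theorem pv_keyY3_inj_idx {a b : pvQ} (h : pvKeyY3 a = pvKeyY3 b) : a.2.2.1 = b.2.2.1 := by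
  simp only [pvKeyY3, toLex_inj, Prod.mk.injEq] at h
  exact h.2.2

theorem pv_keyX3_inj_idx {a b : pvQ} (h : pvKeyX3 a = pvKeyX3 b) : a.2.2.1 = b.2.2.1 := by
  simp only [pvKeyX3, toLex_inj, Prod.mk.injEq] at h
  exact h.2.2

-- ----- order facts about the quad sorts -----

theorem pv_perm_sortY3 (l : List pvQ) : (pvSortB pvCmpY3 l).Perm l := by
  rw [← pv_sorted_y3]
  exact PySem.List.sorted_perm l pvKeyY3 false

theorem pv_perm_sortX3 (l : List pvQ) : (pvSortB pvCmpX3 l).Perm l := by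
  rw [← pv_sorted_x3]
  exact PySem.List.sorted_perm l pvKeyX3 false

theorem pv_pairwise_ne_of_perm {l l' : List pvQ} (hp : l.Perm l')
    (h : l'.Pairwise (fun a b => a.2.2.1 ≠ b.2.2.1)) :
    l.Pairwise (fun a b => a.2.2.1 ≠ b.2.2.1) :=
  (List.Perm.pairwise_iff (fun {a b} hab => Ne.symm hab) hp).2 h

theorem pv_sortY3_pairwise_lt (l : List pvQ)
    (hne : l.Pairwise (fun a b => a.2.2.1 ≠ b.2.2.1)) :
    (pvSortB pvCmpY3 l).Pairwise (fun a b => pvKeyY3 a < pvKeyY3 b) := by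
  have hle : (pvSortB pvCmpY3 l).Pairwise (fun a b => pvKeyY3 a ≤ pvKeyY3 b) := by
    rw [← pv_sorted_y3]
    exact PySem.List.sorted_pairwise l pvKeyY3
  have hne' := pv_pairwise_ne_of_perm (pv_perm_sortY3 l) hne
  exact (hle.and hne').imp (fun {a b} h =>
    lt_of_le_of_ne h.1 (fun he => h.2 (pv_keyY3_inj_idx he)))

theorem pv_sortX3_pairwise_lt (l : List pvQ)
    (hne : l.Pairwise (fun a b => a.2.2.1 ≠ b.2.2.1)) :
    (pvSortB pvCmpX3 l).Pairwise (fun a b => pvKeyX3 a < pvKeyX3 b) := by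
  have hle : (pvSortB pvCmpX3 l).Pairwise (fun a b => pvKeyX3 a ≤ pvKeyX3 b) := by
    rw [← pv_sorted_x3]
    exact PySem.List.sorted_pairwise l pvKeyX3
  have hne' := pv_pairwise_ne_of_perm (pv_perm_sortX3 l) hne
  exact (hle.and hne').imp (fun {a b} h =>
    lt_of_le_of_ne h.1 (fun he => h.2 (pv_keyX3_inj_idx he)))

-- ----- takeWhile / dropWhile on a sorted list are filters -----

theorem pv_takeWhile_eq_filter {α : Type} (p : α → Bool) (R : α → α → Prop)
    (hmon : ∀ a b, R a b → p b = true → p a = true) :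
    ∀ l : List α, l.Pairwise R → l.takeWhile p = l.filter p := by
  intro l
  induction l with
  | nil => intro _; rfl
  | cons x l ih =>
    intro hp
    by_cases hx : p x = true
    · simp [List.takeWhile_cons, List.filter_cons, hx, ih (List.Pairwise.of_cons hp)]
    · have hnil : l.filter p = [] := List.filter_eq_nil_iff.2 (fun b hb hpb =>
        hx (hmon x b ((List.pairwise_cons.1 hp).1 b hb) hpb))
      simp only [Bool.not_eq_true] at hx
      simp [List.takeWhile_cons, List.filter_cons, hx, hnil]

theorem pv_dropWhile_eq_filter {α : Type} (p : α → Bool) (R : α → α → Prop)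
    (hmon : ∀ a b, R a b → p b = true → p a = true) :
    ∀ l : List α, l.Pairwise R → l.dropWhile p = l.filter (fun x => !(p x)) := by
  intro l
  induction l with
  | nil => intro _; rfl
  | cons x l ih =>
    intro hp
    by_cases hx : p x = true
    · simp [List.dropWhile_cons, List.filter_cons, hx, ih (List.Pairwise.of_cons hp)]
    · have hall : l.filter (fun x => !(p x)) = l := List.filter_eq_self.2 (fun b hb => by
        have : p b = false := by
          by_contra hc
          simp only [Bool.not_eq_false] at hc
          exact hx (hmon x b ((List.pairwise_cons.1 hp).1 b hb) hc)
        simp [this])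
      simp only [Bool.not_eq_true] at hx
      simp [List.dropWhile_cons, List.filter_cons, hx, hall]

-- lex key orders imply component facts
theorem pv_keyY3_lt_first {a b : pvQ} (h : pvKeyY3 a < pvKeyY3 b) : a.1 ≤ b.1 := by
  rw [pvKeyY3, pvKeyY3, Prod.Lex.lt_iff] at h
  simp only [ofLex_toLex] at h
  rcases h with h' | h'
  · exact le_of_lt h'
  · exact le_of_eq h'.1

-- ----- A's fold equals the structural grouping -----

theorem pv_foldA (thr : Int) :
    ∀ (s' : List pvP) (g : List (List pvP)) (e : pvP) (cur : List pvP),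
      (∀ p ∈ s', pvMinY e ≤ pvMinY p) →
      s'.Pairwise (fun a b => pvMinY a ≤ pvMinY b) →
      (s'.foldl (pvStepA thr) (g, e :: cur, pvMinY e)).1
          ++ [PySem.List.sorted (s'.foldl (pvStepA thr) (g, e :: cur, pvMinY e)).2.1 pvMinX]
        = g ++ pvSortB pvCmpPolyX
              ((e :: cur) ++ s'.takeWhile (fun p => decide (pvMinY p - pvMinY e ≤ thr)))
            :: pvGroupsP thr (s'.dropWhile (fun p => decide (pvMinY p - pvMinY e ≤ thr))) := by
  intro s'
  induction s' with
  | nil =>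
    intro g e cur _ _
    simp [List.foldl_nil, pv_sorted_x, pvGroupsP_nil]
  | cons q s'' ih =>
    intro g e cur hall hpair
    have hq : pvMinY e ≤ pvMinY q := hall q (by simp)
    by_cases hc : pvMinY q - pvMinY e ≤ thr
    · have hstep : pvStepA thr (g, e :: cur, pvMinY e) q = (g, e :: (cur ++ [q]), pvMinY e) := by
        have habs : |pvMinY q - pvMinY e| ≤ thr := by
          rw [abs_of_nonneg (by omega)]; omega
        simp [pvStepA, habs]
      simp only [List.foldl_cons, hstep]
      rw [ih g e (cur ++ [q]) (fun p hp => hall p (by simp [hp])) (List.Pairwise.of_cons hpair)]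
      have hqd : ((fun p => decide (pvMinY p - pvMinY e ≤ thr)) q) = true := by
        simp only [decide_eq_true_eq]
        omega
      have htw : (q :: s'').takeWhile (fun p => decide (pvMinY p - pvMinY e ≤ thr))
          = q :: s''.takeWhile (fun p => decide (pvMinY p - pvMinY e ≤ thr)) := by
        rw [List.takeWhile_cons, if_pos hqd]
      have hdw : (q :: s'').dropWhile (fun p => decide (pvMinY p - pvMinY e ≤ thr))
          = s''.dropWhile (fun p => decide (pvMinY p - pvMinY e ≤ thr)) := by
        rw [List.dropWhile_cons, if_pos hqd]
      rw [htw, hdw]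
      have hl : (e :: (cur ++ [q])) ++ s''.takeWhile (fun p => decide (pvMinY p - pvMinY e ≤ thr))
          = (e :: cur) ++ q :: s''.takeWhile (fun p => decide (pvMinY p - pvMinY e ≤ thr)) := by
        simp
      rw [hl]
    · have hstep : pvStepA thr (g, e :: cur, pvMinY e) q
          = (g ++ [PySem.List.sorted (e :: cur) pvMinX], [q], pvMinY q) := by
        have habs : ¬ |pvMinY q - pvMinY e| ≤ thr := by
          rw [abs_of_nonneg (by omega)]; omega
        simp [pvStepA, habs]
      simp only [List.foldl_cons, hstep]
      have hall'' : ∀ p ∈ s'', pvMinY q ≤ pvMinY p :=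
        fun p hp => (List.pairwise_cons.1 hpair).1 p hp
      have := ih (g ++ [PySem.List.sorted (e :: cur) pvMinX]) q []
        hall'' (List.Pairwise.of_cons hpair)
      rw [show (q :: ([] : List pvP)) = [q] from rfl] at this
      rw [this]
      have hqd' : ¬ (((fun p => decide (pvMinY p - pvMinY e ≤ thr)) q) = true) := by
        simp only [decide_eq_true_eq]
        omega
      have htw : (q :: s'').takeWhile (fun p => decide (pvMinY p - pvMinY e ≤ thr)) = [] := by
        rw [List.takeWhile_cons, if_neg hqd']
      have hdw : (q :: s'').dropWhile (fun p => decide (pvMinY p - pvMinY e ≤ thr))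
          = q :: s'' := by
        rw [List.dropWhile_cons, if_neg hqd']
      rw [htw, hdw, pvGroupsP_cons, pv_sorted_x]
      simp [List.append_assoc]

-- ----- the poly-level grouping is the projected quad-level grouping -----

theorem pv_bridge (thr : Int) :
    ∀ (n : Nat) (s : List pvQ), s.length ≤ n →
      s.Pairwise (fun a b => pvKeyY3 a < pvKeyY3 b) → (∀ t ∈ s, pvPq t) →
      pvGroupsP thr (s.map pvProj) = (pvGroupsQ thr s).map (List.map pvProj) := by
  intro n
  induction n with
  | zero =>
    intro s hl _ _
    have : s = [] := List.eq_nil_of_length_eq_zero (Nat.le_zero.1 hl)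
    subst this
    simp [pvGroupsP_nil, pvGroupsQ_nil]
  | succ n ih =>
    intro s hl hp hPq
    cases s with
    | nil => simp [pvGroupsP_nil, pvGroupsQ_nil]
    | cons e s' =>
      have hPq_e : pvPq e := hPq e (by simp)
      have hp' : s'.Pairwise (fun a b => pvKeyY3 a < pvKeyY3 b) := List.Pairwise.of_cons hp
      have hPq' : ∀ t ∈ s', pvPq t := fun t ht => hPq t (by simp [ht])
      have hpm : s'.Pairwise (fun a b =>
          (pvKeyY3 a < pvKeyY3 b) ∧ pvPq a ∧ pvPq b) := pv_pairwise_mem hp' hPq'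
      -- the three predicates agree on s' members, and both takeWhiles are filters
      have hmon : ∀ (a b : pvQ), (pvKeyY3 a < pvKeyY3 b) ∧ pvPq a ∧ pvPq b →
          ((fun t => decide (pvMinY (pvProj t) - pvMinY (pvProj e) ≤ thr)) b = true) →
          ((fun t => decide (pvMinY (pvProj t) - pvMinY (pvProj e) ≤ thr)) a = true) := by
        intro a b hr hb
        have h1 := pv_keyY3_lt_first hr.1
        simp only [pvProj, decide_eq_true_eq] at hb ⊢
        rw [← hr.2.1.1]
        rw [← hr.2.2.1] at hb
        omega
      have hmonQ : ∀ (a b : pvQ), (pvKeyY3 a < pvKeyY3 b) ∧ pvPq a ∧ pvPq b →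
          (pvCondQ thr e.1 b = true) → (pvCondQ thr e.1 a = true) := by
        intro a b hr hb
        have h1 := pv_keyY3_lt_first hr.1
        simp only [pvCondQ, decide_eq_true_eq] at hb ⊢
        omega
      have hcongr : ∀ t ∈ s',
          decide (pvMinY (pvProj t) - pvMinY (pvProj e) ≤ thr)
            = pvCondQ thr e.1 t := by
        intro t ht
        have := (hPq' t ht).1
        simp only [pvCondQ, pvProj, ← this, ← hPq_e.1]
      have htwq : s'.takeWhile (fun t => decide (pvMinY (pvProj t) - pvMinY (pvProj e) ≤ thr))
          = s'.takeWhile (pvCondQ thr e.1) := by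
        rw [pv_takeWhile_eq_filter _ _ hmon s' hpm, pv_takeWhile_eq_filter _ _ hmonQ s' hpm,
          List.filter_congr hcongr]
      have hdwq : s'.dropWhile (fun t => decide (pvMinY (pvProj t) - pvMinY (pvProj e) ≤ thr))
          = s'.dropWhile (pvCondQ thr e.1) := by
        rw [pv_dropWhile_eq_filter _ _ hmon s' hpm, pv_dropWhile_eq_filter _ _ hmonQ s' hpm]
        refine List.filter_congr ?_
        intro t ht
        rw [hcongr t ht]
      rw [List.map_cons, pvGroupsP_cons, pvGroupsQ_cons]
      rw [List.takeWhile_map, List.dropWhile_map]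
      have hcomp1 : (fun p => decide (pvMinY p - pvMinY (pvProj e) ≤ thr)) ∘ pvProj
          = (fun t => decide (pvMinY (pvProj t) - pvMinY (pvProj e) ≤ thr)) := rfl
      rw [hcomp1, htwq, hdwq]
      -- head group: lift the pvMinX sort through pvProj
      have hgrp_pw : (e :: s'.takeWhile (pvCondQ thr e.1)).Pairwise
          (fun a b => (pvKeyY3 a < pvKeyY3 b) ∧ pvPq a ∧ pvPq b) := by
        have hsub : (e :: s'.takeWhile (pvCondQ thr e.1)).Sublist (e :: s') :=
          List.Sublist.cons₂ e (List.takeWhile_sublist _)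
        exact List.Pairwise.sublist hsub (pv_pairwise_mem hp hPq)
      have hhead : pvSortB pvCmpPolyX ((e :: s'.takeWhile (pvCondQ thr e.1)).map pvProj)
          = (pvSortB pvCmpX3 (e :: s'.takeWhile (pvCondQ thr e.1))).map pvProj :=
        pv_sortB_map_rel pvCmpPolyX pvCmpX3 pvProj _ _ hgrp_pw
          (fun x y hr => pv_cmpX_lift x y hr.2.2 hr.2.1 hr.1)
      have hlen : (s'.dropWhile (pvCondQ thr e.1)).length ≤ n := by
        have h1 := List.Sublist.length_le (List.dropWhile_sublist (l := s') (p := pvCondQ thr e.1))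
        simp only [List.length_cons] at hl
        omega
      have htail := ih (s'.dropWhile (pvCondQ thr e.1)) hlen
        (List.Pairwise.sublist (List.dropWhile_sublist _) hp')
        (fun t ht => hPq' t (List.Sublist.mem ht (List.dropWhile_sublist _)))
      simp only [List.map_cons]
      rw [htail, ← hhead]
      simp

-- ----- Python's min over the 3-tuple key picks the head of the sorted list -----

theorem pv_foldmin_spec :
    ∀ (t : List pvQ) (h : pvQ),
      pvMinFold h t ∈ h :: t ∧
      ∀ y ∈ h :: t, ¬ (pvKeyY3 y < pvKeyY3 (pvMinFold h t)) := by
  intro t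
  simp only [pvMinFold]
  induction t with
  | nil =>
    intro h
    refine ⟨by simp, ?_⟩
    intro y hy
    simp only [List.foldl_nil]
    rcases List.mem_singleton.1 hy with rfl
    exact lt_irrefl _
  | cons x t ih =>
    intro h
    simp only [List.foldl_cons]
    obtain ⟨hmem, hmin⟩ := ih (if pvKeyY3 x < pvKeyY3 h then x else h)
    constructor
    · rcases List.mem_cons.1 hmem with h' | h'
      · rw [h']; split <;> simp
      · simp [h']
    · intro y hy
      have hle : pvKeyY3 (if pvKeyY3 x < pvKeyY3 h then x else h) ≤ pvKeyY3 h ∧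
          pvKeyY3 (if pvKeyY3 x < pvKeyY3 h then x else h) ≤ pvKeyY3 x := by
        split
        · next hxy => exact ⟨le_of_lt hxy, le_refl _⟩
        · next hxy => exact ⟨le_refl _, not_lt.1 hxy⟩
      rcases List.mem_cons.1 hy with rfl | hy'
      · intro hlt
        exact hmin _ (by simp) (lt_of_le_of_lt hle.1 hlt)
      · rcases List.mem_cons.1 hy' with rfl | hy'' 
        · intro hlt
          exact hmin _ (by simp) (lt_of_le_of_lt hle.2 hlt)
        · exact hmin y (by simp [hy''])

theorem pv_minFold_eq_head (r0 : pvQ) (rt : List pvQ) (e : pvQ) (s' : List pvQ)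
    (hs : pvSortB pvCmpY3 (r0 :: rt) = e :: s')
    (hlt : (pvSortB pvCmpY3 (r0 :: rt)).Pairwise (fun a b => pvKeyY3 a < pvKeyY3 b)) :
    pvMinFold r0 rt = e := by
  have hperm : (pvSortB pvCmpY3 (r0 :: rt)).Perm (r0 :: rt) := pv_perm_sortY3 _
  obtain ⟨hmem, hmin⟩ := pv_foldmin_spec rt r0
  have hemem : e ∈ r0 :: rt := hperm.mem_iff.1 (by rw [hs]; simp)
  have hstrict : ∀ y ∈ r0 :: rt, y ≠ e → pvKeyY3 e < pvKeyY3 y := by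
    intro y hy hne
    have hy' : y ∈ e :: s' := by
      rw [← hs]
      exact hperm.mem_iff.2 hy
    rcases List.mem_cons.1 hy' with rfl | hy''
    · exact absurd rfl hne
    · rw [hs] at hlt
      exact (List.pairwise_cons.1 hlt).1 y hy''
  by_contra hne
  exact hmin e hemem (hstrict _ hmem hne)

-- ----- B's loop equals the projected quad-level grouping of the sorted list -----

theorem pv_Bloop (thr : Int) :
    ∀ (n : Nat) (remaining : List pvQ), remaining.length ≤ n →
      remaining.Pairwise (fun a b => a.2.2.1 < b.2.2.1) →
      pvBLoop thr remaining
        = ((pvGroupsQ thr (pvSortB pvCmpY3 remaining)).map (List.map pvProj)).flatten := by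
  intro n
  induction n with
  | zero =>
    intro remaining hl _
    have : remaining = [] := List.eq_nil_of_length_eq_zero (Nat.le_zero.1 hl)
    subst this
    rw [pvBLoop_nil]
    simp [pvSortB, pvGroupsQ_nil]
  | succ n ih =>
    intro remaining hl hidx
    cases remaining with
    | nil =>
      rw [pvBLoop_nil]
      simp [pvSortB, pvGroupsQ_nil]
    | cons r0 rt =>
      have hne_pair : (r0 :: rt).Pairwise (fun a b : pvQ => a.2.2.1 ≠ b.2.2.1) :=
        hidx.imp (fun h => ne_of_lt h)
      have hperm : (pvSortB pvCmpY3 (r0 :: rt)).Perm (r0 :: rt) := pv_perm_sortY3 _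
      have hs_lt : (pvSortB pvCmpY3 (r0 :: rt)).Pairwise (fun a b => pvKeyY3 a < pvKeyY3 b) :=
        pv_sortY3_pairwise_lt _ hne_pair
      have hs_ne : (pvSortB pvCmpY3 (r0 :: rt)).Pairwise (fun a b => a.2.2.1 ≠ b.2.2.1) :=
        pv_pairwise_ne_of_perm hperm hne_pair
      obtain ⟨e, s', hs⟩ : ∃ e s', pvSortB pvCmpY3 (r0 :: rt) = e :: s' := by
        cases hcase : pvSortB pvCmpY3 (r0 :: rt) with
        | nil =>
          exfalso
          have := hperm.length_eq
          rw [hcase] at this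
          simp at this
        | cons a b => exact ⟨a, b, rfl⟩
      have hmin : pvMinFold r0 rt = e := pv_minFold_eq_head r0 rt e s' hs hs_lt
      rw [pvBLoop_cons, hmin]
      have hcond_e : pvCond thr e e = true := by simp [pvCond]
      have hs'_lt : s'.Pairwise (fun a b => pvKeyY3 a < pvKeyY3 b) := by
        rw [hs] at hs_lt
        exact List.Pairwise.of_cons hs_lt
      have hidx_e : ∀ t ∈ s', t.2.2.1 ≠ e.2.2.1 := by
        intro t ht
        rw [hs] at hs_ne
        exact fun h => ((List.pairwise_cons.1 hs_ne).1 t ht) h.symm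
      have hcongr : ∀ t ∈ s', pvCond thr e t = pvCondQ thr e.1 t := by
        intro t ht
        simp [pvCond, pvCondQ, hidx_e t ht]
      have hmonQ : ∀ (a b : pvQ), pvKeyY3 a < pvKeyY3 b →
          (pvCondQ thr e.1 b = true) → (pvCondQ thr e.1 a = true) := by
        intro a b hr hb
        have h1 := pv_keyY3_lt_first hr
        simp only [pvCondQ, decide_eq_true_eq] at hb ⊢
        omega
      -- the band is (a permutation of) the first structural group
      have hband_perm : ((r0 :: rt).filter (pvCond thr e)).Perm
          (e :: s'.takeWhile (pvCondQ thr e.1)) := by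
        have h1 : ((pvSortB pvCmpY3 (r0 :: rt)).filter (pvCond thr e)).Perm
            ((r0 :: rt).filter (pvCond thr e)) := hperm.filter _
        have h2 : (pvSortB pvCmpY3 (r0 :: rt)).filter (pvCond thr e)
            = e :: s'.filter (pvCondQ thr e.1) := by
          rw [hs, List.filter_cons, if_pos hcond_e, List.filter_congr hcongr]
        have h3 : s'.filter (pvCondQ thr e.1) = s'.takeWhile (pvCondQ thr e.1) :=
          (pv_takeWhile_eq_filter _ _ hmonQ s' hs'_lt).symm
        rw [h2, h3] at h1
        exact h1.symm
      have hband_idx : ((r0 :: rt).filter (pvCond thr e)).Pairwise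
          (fun a b : pvQ => a.2.2.1 < b.2.2.1) := List.Pairwise.filter _ hidx
      have hband_sort : pvSortB pvCmpPair ((r0 :: rt).filter (pvCond thr e))
          = pvSortB pvCmpX3 (e :: s'.takeWhile (pvCondQ thr e.1)) := by
        rw [pv_sortB_congr_rel pvCmpPair pvCmpX3 _ _ hband_idx
          (fun x y hr => pv_cmpPair_lift x y hr)]
        have hgrp_ne : (e :: s'.takeWhile (pvCondQ thr e.1)).Pairwise
            (fun a b : pvQ => a.2.2.1 ≠ b.2.2.1) := by
          refine List.Pairwise.sublist ?_ hs_ne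
          rw [hs]
          exact List.Sublist.cons₂ e (List.takeWhile_sublist _)
        have hpwlt : (pvSortB pvCmpX3 (e :: s'.takeWhile (pvCondQ thr e.1))).Pairwise
            (fun a b => pvKeyX3 a < pvKeyX3 b) := pv_sortX3_pairwise_lt _ hgrp_ne
        have hpermL : (pvSortB pvCmpX3 (e :: s'.takeWhile (pvCondQ thr e.1))).Perm
            ((r0 :: rt).filter (pvCond thr e)) :=
          (pv_perm_sortX3 _).trans hband_perm.symm
        have heq : PySem.List.sorted ((r0 :: rt).filter (pvCond thr e)) pvKeyX3 false
            = pvSortB pvCmpX3 (e :: s'.takeWhile (pvCondQ thr e.1)) := by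
          apply PySem.List.sorted_eq_of_perm_of_pairwise_lt <;>
            first | exact hpermL | exact hpwlt
        rw [pv_sorted_x3] at heq
        exact heq
      -- the rest sorts to the structural remainder
      have hrest_sorted : pvSortB pvCmpY3 ((r0 :: rt).filter (fun t => !(pvCond thr e t)))
          = s'.dropWhile (pvCondQ thr e.1) := by
        have h1 : ((pvSortB pvCmpY3 (r0 :: rt)).filter (fun t => !(pvCond thr e t))).Perm
            ((r0 :: rt).filter (fun t => !(pvCond thr e t))) := hperm.filter _
        have h2 : (pvSortB pvCmpY3 (r0 :: rt)).filter (fun t => !(pvCond thr e t))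
            = s'.filter (fun t => !(pvCondQ thr e.1 t)) := by
          rw [hs, List.filter_cons, if_neg (by simp [hcond_e])]
          refine List.filter_congr ?_
          intro t ht
          rw [hcongr t ht]
        have h3 : s'.filter (fun t => !(pvCondQ thr e.1 t)) = s'.dropWhile (pvCondQ thr e.1) :=
          (pv_dropWhile_eq_filter _ _ hmonQ s' hs'_lt).symm
        rw [h2, h3] at h1
        have hpwlt : (s'.dropWhile (pvCondQ thr e.1)).Pairwise
            (fun a b => pvKeyY3 a < pvKeyY3 b) :=
          List.Pairwise.sublist (List.dropWhile_sublist _) hs'_lt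
        have heq : PySem.List.sorted ((r0 :: rt).filter (fun t => !(pvCond thr e t))) pvKeyY3 false
            = s'.dropWhile (pvCondQ thr e.1) := by
          apply PySem.List.sorted_eq_of_perm_of_pairwise_lt <;>
            first | exact h1 | exact h1.symm | exact hpwlt
        rw [pv_sorted_y3] at heq
        exact heq
      -- recursion on the rest
      have hrest_len : ((r0 :: rt).filter (fun t => !(pvCond thr e t))).length ≤ n := by
        have hlt' : ((r0 :: rt).filter (fun t => !(pvCond thr e t))).length
            < (r0 :: rt).length :=
          List.length_filter_lt_length_iff_exists.2
            ⟨e, hperm.mem_iff.1 (by rw [hs]; simp), by simp [hcond_e]⟩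
        simp only [List.length_cons] at hl hlt'
        omega
      have hrest_idx : ((r0 :: rt).filter (fun t => !(pvCond thr e t))).Pairwise
          (fun a b : pvQ => a.2.2.1 < b.2.2.1) := List.Pairwise.filter _ hidx
      rw [ih _ hrest_len hrest_idx, hrest_sorted]
      rw [hs, pvGroupsQ_cons]
      rw [pv_sorted2_pair, hband_sort]
      simp [pvProj]

-- ----- assembling both ports -----

theorem pv_quads_idx (polygons : List pvP) :
    (pvQuads polygons).Pairwise (fun a b => a.2.2.1 < b.2.2.1) := by
  refine List.Pairwise.map _ ?_ (PySem.List.pairwise_lt_enumerate polygons 0)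
  intro a b h
  exact h

theorem pv_quads_Pq (polygons : List pvP) : ∀ t ∈ pvQuads polygons, pvPq t := by
  intro t ht
  rcases List.mem_map.1 ht with ⟨ip, _, rfl⟩
  exact ⟨rfl, rfl⟩

theorem pv_quads_map_proj (polygons : List pvP) :
    (pvQuads polygons).map pvProj = polygons := by
  simp only [pvQuads, List.map_map]
  have : (pvProj ∘ fun ip : Int × pvP => (pvMinY ip.2, pvMinX ip.2, ip.1, ip.2))
      = fun ip : Int × pvP => ip.2 := rfl
  rw [this]
  exact PySem.List.map_snd_enumerate polygons 0

theorem sort_polygons_eq_alt (polygons : List pvP) (thr : Int) (hne : polygons ≠ []) :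
    sort_polygons polygons thr = sort_polygons_alt polygons thr := by
  unfold sort_polygons sort_polygons_alt
  by_cases hempty : polygons.any (fun p => p.isEmpty) = true
  · rw [if_pos hempty, if_pos hempty]
  · rw [if_neg hempty, if_neg hempty]
    have hidx := pv_quads_idx polygons
    have hPqs := pv_quads_Pq polygons
    have hne_pair : (pvQuads polygons).Pairwise (fun a b => a.2.2.1 ≠ b.2.2.1) :=
      hidx.imp (fun h => ne_of_lt h)
    have hperm : (pvSortB pvCmpY3 (pvQuads polygons)).Perm (pvQuads polygons) :=
      pv_perm_sortY3 _
    have hs_lt : (pvSortB pvCmpY3 (pvQuads polygons)).Pairwise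
        (fun a b => pvKeyY3 a < pvKeyY3 b) := pv_sortY3_pairwise_lt _ hne_pair
    have hs_Pq : ∀ t ∈ pvSortB pvCmpY3 (pvQuads polygons), pvPq t :=
      fun t ht => hPqs t (hperm.mem_iff.1 ht)
    -- the initial sort, lifted to quads
    have hAsort : PySem.List.sorted2 polygons pvMinY pvMinX
        = (pvSortB pvCmpY3 (pvQuads polygons)).map pvProj := by
      rw [pv_sorted2_poly]
      conv_lhs => rw [← pv_quads_map_proj polygons]
      exact pv_sortB_map_rel pvCmpPolyY pvCmpY3 pvProj _ _
        (pv_pairwise_mem hidx hPqs)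
        (fun x y hr => pv_cmpY_lift x y hr.2.2 hr.2.1 hr.1)
    obtain ⟨e, s', hs⟩ : ∃ e s', pvSortB pvCmpY3 (pvQuads polygons) = e :: s' := by
      cases hcase : pvSortB pvCmpY3 (pvQuads polygons) with
      | nil =>
        exfalso
        have := hperm.length_eq
        rw [hcase] at this
        apply hne
        have hq : pvQuads polygons = [] := List.eq_nil_of_length_eq_zero this.symm
        have := congrArg (List.map pvProj) hq
        rw [pv_quads_map_proj polygons] at this
        simpa using this
      | cons a b => exact ⟨a, b, rfl⟩
    rw [hAsort, hs, List.map_cons]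
    show (((s'.map pvProj).foldl (pvStepA thr) ([], [pvProj e], pvMinY (pvProj e))).1
        ++ [PySem.List.sorted
            ((s'.map pvProj).foldl (pvStepA thr) ([], [pvProj e], pvMinY (pvProj e))).2.1
            pvMinX]).flatten
      = pvBLoop thr (pvQuads polygons)
    -- A's fold: apply pv_foldA with e := pvProj e, cur := []
    have hPq_e : pvPq e := hs_Pq e (by rw [hs]; simp)
    have hs'_lt : s'.Pairwise (fun a b => pvKeyY3 a < pvKeyY3 b) := by
      rw [hs] at hs_lt
      exact List.Pairwise.of_cons hs_lt
    have hs'_Pq : ∀ t ∈ s', pvPq t := fun t ht => hs_Pq t (by rw [hs]; simp [ht])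
    have hall : ∀ p ∈ s'.map pvProj, pvMinY (pvProj e) ≤ pvMinY p := by
      intro p hp
      rcases List.mem_map.1 hp with ⟨t, ht, rfl⟩
      have hkey : pvKeyY3 e < pvKeyY3 t := by
        rw [hs] at hs_lt
        exact (List.pairwise_cons.1 hs_lt).1 t ht
      have h1 := pv_keyY3_lt_first hkey
      rw [pvProj, pvProj, ← hPq_e.1, ← (hs'_Pq t ht).1]
      exact h1
    have hpairP : (s'.map pvProj).Pairwise (fun a b => pvMinY a ≤ pvMinY b) := by
      refine List.Pairwise.map _ ?_ (pv_pairwise_mem hs'_lt hs'_Pq)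
      intro a b h
      have h1 := pv_keyY3_lt_first h.1
      rw [pvProj, pvProj, ← h.2.1.1, ← h.2.2.1]
      exact h1
    have hfold := pv_foldA thr (s'.map pvProj) [] (pvProj e) [] hall hpairP
    rw [show (pvProj e :: ([] : List pvP)) = [pvProj e] from rfl] at hfold
    have hAval : ((s'.map pvProj).foldl (pvStepA thr) ([], [pvProj e], pvMinY (pvProj e))).1
          ++ [PySem.List.sorted
              ((s'.map pvProj).foldl (pvStepA thr) ([], [pvProj e], pvMinY (pvProj e))).2.1 pvMinX]
        = pvGroupsP thr ((e :: s').map pvProj) := by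
      rw [hfold, List.map_cons, pvGroupsP_cons]
      simp
    rw [hAval, ← hs]
    -- bridge to quads and to B's loop
    rw [pv_bridge thr (pvSortB pvCmpY3 (pvQuads polygons)).length _ le_rfl hs_lt hs_Pq]
    rw [pv_Bloop thr (pvQuads polygons).length (pvQuads polygons) le_rfl hidx]

-- ===== VERDICT (by name: the statement is the Claim_ definition above) =====
theorem sort_polygons_spec : Claim_equal_sort_polygons := by
  intro polygons y_threshold _ hpre
  unfold Spec_sort_polygons
  exact sort_polygons_eq_alt polygons y_threshold hpre
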